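-- pv_equiv track=rewrite | github.com/Sasas-Lss/ESP-Align | Benchmarks/Bench_Scripts/Foldseek_bench_precious.py | extract_matching_pairs
-- ===== SOURCE A (Python) =====
-- def extract_matching_pairs(seq1_aligned, seq2_aligned):
--     i_idx, j_idx = 0, 0
--     match_pairs = []
--     for a, b in zip(seq1_aligned, seq2_aligned):
--         if a != '-' and b != '-':
--             match_pairs.append((i_idx, j_idx))
--         if a != '-':
--             i_idx += 1
--         if b != '-':
--             j_idx += 1
--     return set(match_pairs)
-- ===== SOURCE B (Python) =====
-- def extract_matching_pairs(seq1_aligned, seq2_aligned):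
--     pos1 = []
--     c = 0
--     for ch in seq1_aligned:
--         pos1.append(c)
--         if ch != '-':
--             c += 1
--     pos2 = []
--     c = 0
--     for ch in seq2_aligned:
--         pos2.append(c)
--         if ch != '-':
--             c += 1
--     return {(pos1[k], pos2[k])
--             for k, (a, b) in enumerate(zip(seq1_aligned, seq2_aligned))
--             if a != '-' and b != '-'}
-- ===== Notes on version B (the rewrite author's own statement) =====
-- stated objective: alternative
-- what changed: Replaces the single fused counter loop with two separate prefix coordinate-table passes (pos1/pos2 = ungapped index at each column) followed by one set-comprehension combining pass over the zipped columns.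
import Mathlib
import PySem

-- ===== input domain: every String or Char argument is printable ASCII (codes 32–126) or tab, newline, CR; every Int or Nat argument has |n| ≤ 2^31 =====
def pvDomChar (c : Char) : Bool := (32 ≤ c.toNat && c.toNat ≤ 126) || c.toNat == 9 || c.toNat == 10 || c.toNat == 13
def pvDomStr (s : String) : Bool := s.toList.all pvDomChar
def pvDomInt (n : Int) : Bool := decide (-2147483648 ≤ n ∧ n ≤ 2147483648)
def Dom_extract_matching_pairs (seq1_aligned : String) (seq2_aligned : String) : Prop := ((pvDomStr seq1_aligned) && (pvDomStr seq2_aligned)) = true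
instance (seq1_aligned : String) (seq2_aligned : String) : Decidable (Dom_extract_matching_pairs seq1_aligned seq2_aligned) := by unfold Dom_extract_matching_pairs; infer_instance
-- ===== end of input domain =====

-- B rebuilds the result from two prefix coordinate tables plus one combining pass, instead of A's fused counter loop (objective: alternative decomposition).

-- ===== PORT A =====
-- the for-loop over zip(seq1, seq2) with counters i_idx, j_idx and the accumulating list
def pvLoopA : List Char → List Char → Int → Int → List (Int × Int)
  | a :: as, b :: bs, i, j =>
      (if a ≠ '-' ∧ b ≠ '-' then [(i, j)] else []) ++
        pvLoopA as bs (if a ≠ '-' then i + 1 else i) (if b ≠ '-' then j + 1 else j)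
  | _, _, _, _ => []

def extract_matching_pairs (seq1_aligned : String) (seq2_aligned : String) : List (Int × Int) :=
  PySem.Set.ofList (pvLoopA seq1_aligned.toList seq2_aligned.toList 0 0)

-- ===== PORT B =====
-- prefix table: pos[k] = ungapped index at column k (counter appended before conditional increment)
def pvPosTab : List Char → Int → List Int
  | [], _ => []
  | ch :: rest, c => c :: pvPosTab rest (if ch ≠ '-' then c + 1 else c)

-- the set comprehension: for each column k of the zipped sequences, emit (pos1[k], pos2[k]) if both non-gap
def pvComb : List Char → List Char → List Int → List Int → List (Int × Int)
  | a :: as, b :: bs, p :: ps, q :: qs =>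
      (if a ≠ '-' ∧ b ≠ '-' then [(p, q)] else []) ++ pvComb as bs ps qs
  | _, _, _, _ => []

def extract_matching_pairs_alt (seq1_aligned : String) (seq2_aligned : String) : List (Int × Int) :=
  PySem.Set.ofList
    (pvComb seq1_aligned.toList seq2_aligned.toList
      (pvPosTab seq1_aligned.toList 0) (pvPosTab seq2_aligned.toList 0))

-- ===== PRECONDITION & SPEC =====
def Spec_extract_matching_pairs (seq1_aligned : String) (seq2_aligned : String) (out : List (Int × Int)) : Prop := out = extract_matching_pairs_alt seq1_aligned seq2_aligned
instance (seq1_aligned : String) (seq2_aligned : String) (out : List (Int × Int)) : Decidable (Spec_extract_matching_pairs seq1_aligned seq2_aligned out) := by unfold Spec_extract_matching_pairs; infer_instance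

-- ===== CLAIM (what is proved, stated in full; the proofs are below) =====
def Claim_equal_extract_matching_pairs : Prop := ∀ (seq1_aligned : String) (seq2_aligned : String), Dom_extract_matching_pairs seq1_aligned seq2_aligned → Spec_extract_matching_pairs seq1_aligned seq2_aligned (extract_matching_pairs seq1_aligned seq2_aligned)

-- ===== LEMMAS AND PROOFS =====
theorem pvLoopA_eq_comb : ∀ (as bs : List Char) (i j : Int),
    pvLoopA as bs i j = pvComb as bs (pvPosTab as i) (pvPosTab bs j) := by
  intro as
  induction as with
  | nil => intro bs i j; cases bs <;> rfl
  | cons a as ih =>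
      intro bs i j
      cases bs with
      | nil => rfl
      | cons b bs => simp [pvLoopA, pvPosTab, pvComb, ih]

-- ===== VERDICT (by name: the statement is the Claim_ definition above) =====
theorem extract_matching_pairs_spec : Claim_equal_extract_matching_pairs := by
  intro s1 s2 _
  unfold Spec_extract_matching_pairs extract_matching_pairs extract_matching_pairs_alt
  rw [pvLoopA_eq_comb]
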